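-- pv_equiv track=rewrite | github.com/jreit920/first_repo | Problem Set 10.py | numberize
-- ===== SOURCE A (Python) =====
-- def numberize(Uinput):
--     vowels= 'aeiou'
--     numbers= ['1','2','3','4','5']
--     i=0
--     for k in range(len(Uinput)):
--         while i <=4:
--             for k in vowels[i]:
--                 Uinput= Uinput.replace(k, numbers[i])
--             i+=1
--     numberstr= Uinput.lower().strip().split()
--     return numberstr
-- ===== SOURCE B (Python) =====
-- def numberize(Uinput):
--     table = {'a': '1', 'e': '2', 'i': '3', 'o': '4', 'u': '5'}
--     digitized = ''.join(table.get(c, c) for c in Uinput)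
--     return digitized.lower().strip().split()
-- ===== Notes on version B (the rewrite author's own statement) =====
-- stated objective: idiomatic
-- what changed: Replaces A's convoluted nested loops with five sequential full-string .replace scans by one table-driven single pass (''.join over a vowel->digit dict) followed by the same lower/strip/split.
import Mathlib
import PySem

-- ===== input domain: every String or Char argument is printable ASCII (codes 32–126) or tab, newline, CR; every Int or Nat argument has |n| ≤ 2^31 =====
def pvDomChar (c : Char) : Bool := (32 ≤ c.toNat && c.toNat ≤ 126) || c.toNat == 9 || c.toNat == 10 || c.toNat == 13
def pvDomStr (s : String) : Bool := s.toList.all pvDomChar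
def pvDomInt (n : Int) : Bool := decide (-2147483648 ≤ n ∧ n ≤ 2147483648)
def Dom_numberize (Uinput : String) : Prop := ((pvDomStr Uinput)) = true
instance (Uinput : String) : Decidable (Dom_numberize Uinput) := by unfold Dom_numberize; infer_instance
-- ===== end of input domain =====

-- B replaces A's nested loops of five sequential full-string .replace scans by one
-- table-driven pass; return values are proved equal on all printable-ASCII inputs (objective: idiomatic).

-- ===== PORT A =====
-- 'for k in vowels[i]: Uinput = Uinput.replace(k, numbers[i])' — the one-char string vowels[i]
def pvInnerFor (s : String) (i : Nat) : String :=
  ((PySem.Str.pyGet? "aeiou" (i : Int)).elim [] (fun c => [c])).foldl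
    (fun s k => PySem.Str.replace s (String.ofList [k])
      (PySem.List.pyGetD ["1","2","3","4","5"] (i : Int) "")) s

-- 'while i <= 4: … ; i += 1'
def pvWhile (s : String) (i : Nat) : String × Nat :=
  if i ≤ 4 then pvWhile (pvInnerFor s i) (i + 1) else (s, i)
termination_by 5 - i

def numberize (Uinput : String) : List String :=
  let st := (PySem.List.pyRange 0 (PySem.Str.len Uinput) 1).foldl
    (fun (st : String × Nat) _ => pvWhile st.1 st.2) (Uinput, 0)
  PySem.Str.split₀ (PySem.Str.strip (PySem.Str.lower st.1))

-- ===== PORT B =====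
def pvTable : PySem.Dict Char String :=
  PySem.Dict.mk [('a', "1"), ('e', "2"), ('i', "3"), ('o', "4"), ('u', "5")]

def numberize_alt (Uinput : String) : List String :=
  let digitized := PySem.Str.join ""
    (Uinput.toList.map (fun c => pvTable.getD c (String.ofList [c])))
  PySem.Str.split₀ (PySem.Str.strip (PySem.Str.lower digitized))

-- ===== PRECONDITION & SPEC =====
def Spec_numberize (Uinput : String) (out : List String) : Prop := out = numberize_alt Uinput
instance (Uinput : String) (out : List String) : Decidable (Spec_numberize Uinput out) := by unfold Spec_numberize; infer_instance

-- ===== CLAIM (what is proved, stated in full; the proofs are below) =====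
def Claim_equal_numberize : Prop := ∀ (Uinput : String), Dom_numberize Uinput → Spec_numberize Uinput (numberize Uinput)

-- ===== LEMMAS AND PROOFS =====

-- the per-character map both programs implement
def pvMap (c : Char) : Char :=
  if 'a' = c then '1' else if 'e' = c then '2' else if 'i' = c then '3'
  else if 'o' = c then '4' else if 'u' = c then '5' else c

lemma replace_go_single (a b : Char) (s acc : List Char) (fuel : Nat)
    (h : s.length ≤ fuel) :
    PySem.Chars.replace.go [a] [b] fuel s acc
      = acc.reverse ++ s.map (fun c => if a = c then b else c) := by
  induction fuel generalizing s acc with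
  | zero =>
    interval_cases hs : s.length
    · simp [List.length_eq_zero_iff.mp hs, PySem.Chars.replace.go]
  | succ n ih =>
    cases s with
    | nil => simp [PySem.Chars.replace.go]
    | cons c t =>
      simp only [PySem.Chars.replace.go, List.isPrefixOf, List.map_cons]
      by_cases hac : a = c
      · subst hac
        simp only [beq_self_eq_true, Bool.and_true, if_true]
        rw [ih] <;> simp_all
      · have : (a == c) = false := beq_eq_false_iff_ne.mpr hac
        simp only [this, Bool.false_and, Bool.false_eq_true, if_false, if_neg hac]
        rw [ih] <;> simp_all

lemma replace_single (a b : Char) (s : List Char) :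
    PySem.Chars.replace s [a] [b] = s.map (fun c => if a = c then b else c) := by
  simp [PySem.Chars.replace, replace_go_single a b s [] s.length le_rfl]

lemma pvWhile_ge (s : String) : pvWhile s 5 = (s, 5) := by
  rw [pvWhile]; simp

lemma foldl_noop (l : List Int) (s : String) :
    l.foldl (fun (st : String × Nat) _ => pvWhile st.1 st.2) (s, 5) = (s, 5) := by
  induction l generalizing s with
  | nil => rfl
  | cons x xs ih => simpa [pvWhile_ge] using ih s

lemma pvWhile_zero (s : String) :
    pvWhile s 0 =
      (PySem.Str.replace (PySem.Str.replace (PySem.Str.replace (PySem.Str.replace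
        (PySem.Str.replace s "a" "1") "e" "2") "i" "3") "o" "4") "u" "5", 5) := by
  rw [pvWhile, if_pos (by norm_num), pvWhile, if_pos (by norm_num),
      pvWhile, if_pos (by norm_num), pvWhile, if_pos (by norm_num),
      pvWhile, if_pos (by norm_num), pvWhile, if_neg (by norm_num)]
  rfl

lemma chain_toList (s : String) :
    (PySem.Str.replace (PySem.Str.replace (PySem.Str.replace (PySem.Str.replace
        (PySem.Str.replace s "a" "1") "e" "2") "i" "3") "o" "4") "u" "5").toList
      = s.toList.map pvMap := by
  simp only [PySem.Str.toList_replace,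
    show ("a" : String).toList = ['a'] from rfl, show ("e" : String).toList = ['e'] from rfl,
    show ("i" : String).toList = ['i'] from rfl, show ("o" : String).toList = ['o'] from rfl,
    show ("u" : String).toList = ['u'] from rfl,
    show ("1" : String).toList = ['1'] from rfl, show ("2" : String).toList = ['2'] from rfl,
    show ("3" : String).toList = ['3'] from rfl, show ("4" : String).toList = ['4'] from rfl,
    show ("5" : String).toList = ['5'] from rfl,
    replace_single, List.map_map]
  apply List.map_congr_left
  intro c _
  simp only [Function.comp_apply, pvMap]
  by_cases h1 : 'a' = c
  · subst h1; decide
  by_cases h2 : 'e' = c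
  · subst h2; decide
  by_cases h3 : 'i' = c
  · subst h3; decide
  by_cases h4 : 'o' = c
  · subst h4; decide
  by_cases h5 : 'u' = c
  · subst h5; decide
  simp [h1, h2, h3, h4, h5]

lemma table_char (c : Char) :
    (pvTable.getD c (String.ofList [c])).toList = [pvMap c] := by
  by_cases h1 : 'a' = c
  · subst h1; rfl
  by_cases h2 : 'e' = c
  · subst h2; rfl
  by_cases h3 : 'i' = c
  · subst h3; rfl
  by_cases h4 : 'o' = c
  · subst h4; rfl
  by_cases h5 : 'u' = c
  · subst h5; rfl
  simp [pvTable, PySem.Dict.getD, PySem.Dict.get?, pvMap,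
    beq_eq_false_iff_ne.mpr h1, beq_eq_false_iff_ne.mpr h2, beq_eq_false_iff_ne.mpr h3,
    beq_eq_false_iff_ne.mpr h4, beq_eq_false_iff_ne.mpr h5, h1, h2, h3, h4, h5]

lemma digitized_toList (s : String) :
    (PySem.Str.join "" (s.toList.map (fun c => pvTable.getD c (String.ofList [c])))).toList
      = s.toList.map pvMap := by
  have : ∀ l : List Char,
      PySem.Chars.join [] ((l.map (fun c => pvTable.getD c (String.ofList [c]))).map String.toList)
        = l.map pvMap := by
    intro l
    rw [List.map_map]
    have : (String.toList ∘ fun c => pvTable.getD c (String.ofList [c]))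
        = (fun c => [pvMap c]) := by
      funext c; simpa using table_char c
    rw [this, show (fun c => [pvMap c]) = (fun c => [c]) ∘ pvMap from rfl,
        ← List.map_map]
    exact PySem.Chars.join_nil_singletons _
  simpa [PySem.Str.toList_join] using this s.toList

-- ===== VERDICT (by name: the statement is the Claim_ definition above) =====
theorem numberize_spec : Claim_equal_numberize := by
  intro U _
  unfold Spec_numberize numberize numberize_alt
  by_cases h : U.toList = []
  · have hU : U = "" := by simpa using String.toList_inj.mp (h.trans rfl)
    subst hU; rfl
  · have hlen : (0 : Int) < PySem.Str.len U := by
      simp [PySem.Str.len_eq]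
      exact List.length_pos_iff.mpr h
    rw [PySem.List.pyRange_one_cons hlen]
    simp only [List.foldl_cons, pvWhile_zero, foldl_noop]
    refine congrArg (fun t => PySem.Str.split₀ (PySem.Str.strip (PySem.Str.lower t))) ?_
    refine String.toList_inj.mp ?_
    rw [chain_toList, digitized_toList]
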